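-- pv_equiv track=rewrite | github.com/mapcrafter/blockcrafter | model.py | get_domain_variants
-- ===== SOURCE A (Python) =====
-- import itertools
--
-- def get_domain_variants(domain):
--     # from a dictionary like {'variable1' : {'value1', 'value2'}}
--     # returns all possible variants
--     if len(domain) == 0:
--         return [{}]
--
--     keys = list(domain.keys())
--     values = list(domain.values())
--
--     variants = []
--     for product in itertools.product(*values):
--         variants.append(dict(list(zip(keys, product))))
--     return variants
-- ===== SOURCE B (Python) =====
-- def get_domain_variants(domain):
--     # Build the product incrementally: fold over the keys, extending every
--     # partial variant with each value of the current key (last key varies fastest).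
--     result = [{}]
--     for key, vals in domain.items():
--         result = [{**d, key: v} for d in result for v in vals]
--     return result
-- ===== Notes on version B (the rewrite author's own statement) =====
-- stated objective: simpler
-- what changed: Replaced itertools.product plus per-tuple dict(zip(keys, ...)) reconstruction by a single fold over the keys that extends every partial variant dict with each value of the current key; the explicit empty-domain guard disappears because the fold's seed already yields that result.
import Mathlib
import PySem

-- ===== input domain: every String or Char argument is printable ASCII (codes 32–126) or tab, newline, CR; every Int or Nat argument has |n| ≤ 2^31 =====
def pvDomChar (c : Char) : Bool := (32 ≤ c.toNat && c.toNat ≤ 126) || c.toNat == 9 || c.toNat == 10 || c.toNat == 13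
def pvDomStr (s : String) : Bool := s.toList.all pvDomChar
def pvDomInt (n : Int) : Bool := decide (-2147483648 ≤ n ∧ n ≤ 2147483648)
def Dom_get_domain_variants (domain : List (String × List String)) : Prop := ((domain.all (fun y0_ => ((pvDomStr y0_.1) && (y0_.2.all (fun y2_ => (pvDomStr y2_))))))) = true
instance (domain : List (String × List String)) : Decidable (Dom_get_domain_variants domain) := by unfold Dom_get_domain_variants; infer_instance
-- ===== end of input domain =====

-- B replaces itertools.product + dict(zip(...)) by an incremental fold over the keys (simpler decomposition, same cost).

-- ===== PORT A =====
-- itertools.product(*values): first list varies slowest, last varies fastest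
def pvProduct : List (List String) → List (List String)
  | [] => [[]]
  | v :: vs => v.flatMap (fun x => (pvProduct vs).map (fun p => x :: p))

def get_domain_variants (domain : List (String × List String)) : List (List (String × String)) :=
  if domain.length == 0 then [[]]
  else
    let keys := domain.map (·.1)
    let values := domain.map (·.2)
    (pvProduct values).foldl
      (fun variants p => variants ++ [(PySem.Dict.ofList (keys.zip p)).items]) []

-- ===== PORT B =====
def get_domain_variants_alt (domain : List (String × List String)) : List (List (String × String)) :=
  (domain.foldl
      (fun result kv => result.flatMap (fun d => kv.2.map (fun v => d.insert kv.1 v)))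
      [(PySem.Dict.empty : PySem.Dict String String)]).map (·.items)

-- ===== PRECONDITION & SPEC =====
def Spec_get_domain_variants (domain : List (String × List String)) (out : List (List (String × String))) : Prop := out = get_domain_variants_alt domain
instance (domain : List (String × List String)) (out : List (List (String × String))) : Decidable (Spec_get_domain_variants domain out) := by unfold Spec_get_domain_variants; infer_instance

-- ===== CLAIM (what is proved, stated in full; the proofs are below) =====
def Claim_equal_get_domain_variants : Prop := ∀ (domain : List (String × List String)), Dom_get_domain_variants domain → Spec_get_domain_variants domain (get_domain_variants domain)

-- ===== LEMMAS AND PROOFS =====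

-- B's fold, characterised: it maps the product tuples to insert-folds from each seed dict.
theorem foldB_eq (domain : List (String × List String)) (res : List (PySem.Dict String String)) :
    domain.foldl (fun result kv => result.flatMap (fun d => kv.2.map (fun v => d.insert kv.1 v))) res
      = res.flatMap (fun d => (pvProduct (domain.map (·.2))).map
          (fun p => ((domain.map (·.1)).zip p).foldl (fun d' q => d'.insert q.1 q.2) d)) := by
  induction domain generalizing res with
  | nil => simp [pvProduct]
  | cons kv rest ih =>
      simp only [List.foldl_cons, ih, pvProduct, List.map_cons, List.flatMap_assoc,
        List.map_flatMap, List.flatMap_map, List.map_map]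
      simp [Function.comp_def]

theorem get_domain_variants_spec_aux (domain : List (String × List String)) :
    get_domain_variants domain = get_domain_variants_alt domain := by
  unfold get_domain_variants get_domain_variants_alt
  rw [foldB_eq]
  cases domain with
  | nil => simp [pvProduct, PySem.Dict.empty]
  | cons kv rest =>
      simp only [List.length_cons, List.flatMap_cons, List.flatMap_nil, List.append_nil,
        List.map_map, PySem.List.foldl_append_singleton_eq_map]
      have : ∀ l : List (String × String),
          PySem.Dict.ofList l = l.foldl (fun d p => d.insert p.1 p.2) PySem.Dict.empty := fun _ => rfl
      simp [this, Function.comp]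

-- ===== VERDICT (by name: the statement is the Claim_ definition above) =====
theorem get_domain_variants_spec : Claim_equal_get_domain_variants := by
  intro domain _
  unfold Spec_get_domain_variants
  exact get_domain_variants_spec_aux domain
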